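-- pv_equiv track=rewrite | github.com/kherrera1517/Python | practice.py | subarray_degree
-- ===== SOURCE A (Python) =====
-- def subarray_degree(nums):
--     left, right, count = {}, {}, {}
--     for index, num in enumerate(nums):
--         if num not in left:
--             left[num] = index
--         right[num] = index
--         count[num] = count.get(num, 0) + 1
--     answer = len(nums)
--     degree = max(count.values())
--
--     for num in count:
--         if count[num] == degree:
--             answer = min(answer, right[num]-left[num]+1)
--
--     return answer
-- ===== SOURCE B (Python) =====
-- def subarray_degree(nums):
--     count = {}
--     first = {}
--     degree = 0
--     answer = 0
--     for i, num in enumerate(nums):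
--         if num not in first:
--             first[num] = i
--         c = count.get(num, 0) + 1
--         count[num] = c
--         if c > degree:
--             degree = c
--             answer = i - first[num] + 1
--         elif c == degree:
--             span = i - first[num] + 1
--             if span < answer:
--                 answer = span
--     return answer
-- ===== Notes on version B (the rewrite author's own statement) =====
-- stated objective: alternative
-- what changed: B fuses A's two phases (building left/right/count tables, then a second loop over the distinct values to find the min span at max count) into a single pass maintaining count, first-occurrence index, and running degree/answer scalars, dropping the right table and the trailing loop.
import Mathlib
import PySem

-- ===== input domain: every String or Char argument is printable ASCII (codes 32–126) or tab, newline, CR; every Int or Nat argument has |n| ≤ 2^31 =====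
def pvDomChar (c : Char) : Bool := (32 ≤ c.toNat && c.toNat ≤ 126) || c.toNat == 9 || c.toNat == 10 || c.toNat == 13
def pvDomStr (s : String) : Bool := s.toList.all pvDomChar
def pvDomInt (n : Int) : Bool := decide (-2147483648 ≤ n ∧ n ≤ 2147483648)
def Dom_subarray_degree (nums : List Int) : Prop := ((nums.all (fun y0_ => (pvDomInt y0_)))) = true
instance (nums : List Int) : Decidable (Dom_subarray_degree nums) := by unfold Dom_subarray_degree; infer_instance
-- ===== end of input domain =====

-- B fuses A's two phases (left/right/count tables + trailing loop over distinct values) into one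
-- pass maintaining count, first-occurrence, and running degree/answer scalars; same results, one loop.

-- ===== PORT A =====
-- loop body of A's 'for index, num in enumerate(nums)' over state (left, right, count)
def pvStepA (st : PySem.Dict Int Int × PySem.Dict Int Int × PySem.Dict Int Int) (q : Int × Int) :
    PySem.Dict Int Int × PySem.Dict Int Int × PySem.Dict Int Int :=
  let left := if st.1.contains q.2 then st.1 else st.1.insert q.2 q.1
  let right := st.2.1.insert q.2 q.1
  let count := st.2.2.insert q.2 (st.2.2.getD q.2 0 + 1)
  (left, right, count)

def subarray_degree (nums : List Int) : Int :=
  let st := (PySem.List.enumerate nums).foldl pvStepA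
    (PySem.Dict.empty, PySem.Dict.empty, PySem.Dict.empty)
  let answer : Int := nums.length
  -- max(count.values()): none = ValueError on empty input, excluded by Pre_
  match PySem.List.max? st.2.2.values (fun v => v) with
  | none => answer
  | some degree =>
    st.2.2.keys.foldl
      (fun answer num =>
        if st.2.2.getD num 0 = degree then
          min answer (st.2.1.getD num 0 - st.1.getD num 0 + 1)
        else answer) answer

-- ===== PORT B =====
-- loop body of B's single pass over state (count, first, degree, answer)
def pvStepB (st : PySem.Dict Int Int × PySem.Dict Int Int × Int × Int) (q : Int × Int) :
    PySem.Dict Int Int × PySem.Dict Int Int × Int × Int :=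
  let first := if st.2.1.contains q.2 then st.2.1 else st.2.1.insert q.2 q.1
  let c := st.1.getD q.2 0 + 1
  let count := st.1.insert q.2 c
  if st.2.2.1 < c then
    (count, first, c, q.1 - first.getD q.2 0 + 1)
  else if c = st.2.2.1 then
    let span := q.1 - first.getD q.2 0 + 1
    (count, first, st.2.2.1, if span < st.2.2.2 then span else st.2.2.2)
  else
    (count, first, st.2.2.1, st.2.2.2)

def subarray_degree_alt (nums : List Int) : Int :=
  ((PySem.List.enumerate nums).foldl pvStepB
    (PySem.Dict.empty, PySem.Dict.empty, 0, 0)).2.2.2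

-- ===== PRECONDITION & SPEC =====
-- Pre_ excludes only the empty list, on which A's max() raises ValueError.
def Pre_subarray_degree (nums : List Int) : Prop := nums ≠ []
instance (nums : List Int) : Decidable (Pre_subarray_degree nums) := by
  unfold Pre_subarray_degree; infer_instance
def pvWitness_subarray_degree : List Int := [1, 2, 2, 3, 1]

def Spec_subarray_degree (nums : List Int) (out : Int) : Prop := out = subarray_degree_alt nums
instance (nums : List Int) (out : Int) : Decidable (Spec_subarray_degree nums out) := by
  unfold Spec_subarray_degree; infer_instance

-- ===== CLAIM (what is proved, stated in full; the proofs are below) =====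
def Claim_equal_subarray_degree : Prop := ∀ (nums : List Int), Dom_subarray_degree nums →
  Pre_subarray_degree nums → Spec_subarray_degree nums (subarray_degree nums)

-- ===== LEMMAS AND PROOFS =====

-- the joint loop invariant tying A's three tables to B's fused state after any prefix p
def pvInv (p : List Int) : Prop :=
  let a := (PySem.List.enumerate p).foldl pvStepA
    (PySem.Dict.empty, PySem.Dict.empty, PySem.Dict.empty)
  let b := (PySem.List.enumerate p).foldl pvStepB
    (PySem.Dict.empty, PySem.Dict.empty, 0, 0)
  b.1 = a.2.2 ∧
  b.2.1 = a.1 ∧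
  a.2.2.keys = PySem.Set.ofList p ∧
  a.1.keys = a.2.2.keys ∧
  a.2.2.keys.Nodup ∧
  (∀ k, a.2.2.getD k 0 = (p.count k : Int)) ∧
  (p ≠ [] →
    1 ≤ b.2.2.1 ∧
    (∀ k ∈ a.2.2.keys, a.2.2.getD k 0 ≤ b.2.2.1) ∧
    (∀ k ∈ a.2.2.keys, ∃ jL jR : Nat,
      a.1.getD k 0 = (jL : Int) ∧ a.2.1.getD k 0 = (jR : Int) ∧ jL ≤ jR ∧ jR < p.length) ∧
    (∃ k ∈ a.2.2.keys, a.2.2.getD k 0 = b.2.2.1 ∧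
      b.2.2.2 = a.2.1.getD k 0 - a.1.getD k 0 + 1) ∧
    (∀ k ∈ a.2.2.keys, a.2.2.getD k 0 = b.2.2.1 →
      b.2.2.2 ≤ a.2.1.getD k 0 - a.1.getD k 0 + 1))

lemma pvInv_all (p : List Int) : pvInv p := by
  induction p using List.reverseRecOn with
  | nil =>
    simp [pvInv, PySem.List.enumerate_nil, List.foldl_nil, PySem.Dict.keys_empty,
      PySem.Dict.getD_empty, PySem.Set.ofList]
  | append_singleton p x ih =>
    simp only [pvInv] at ih ⊢
    obtain ⟨hbC, hbL, hkeys, hLk, hnd, hcnt, hrest⟩ := ih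
    simp only [PySem.List.enumerate_append, PySem.List.enumerate_cons, PySem.List.enumerate_nil,
      List.foldl_append, List.foldl_cons, List.foldl_nil, zero_add]
    have hof : PySem.Set.ofList (p ++ [x]) = PySem.Set.add (PySem.Set.ofList p) x := by
      rw [PySem.Set.ofList_eq_foldl, List.foldl_append, ← PySem.Set.ofList_eq_foldl]; rfl
    have hget_self : ∀ (d : PySem.Dict Int Int) (v : Int), (d.insert x v).getD x 0 = v :=
      fun d v => by rw [PySem.Dict.getD_insert, if_pos rfl]
    have hget_ne : ∀ (d : PySem.Dict Int Int) (v k : Int), k ≠ x →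
        (d.insert x v).getD k 0 = d.getD k 0 :=
      fun d v k hk => by rw [PySem.Dict.getD_insert, if_neg hk]
    by_cases hp : p = []
    · subst hp
      simp only [PySem.List.enumerate_nil, List.foldl_nil, pvStepA, pvStepB,
        PySem.Dict.contains_empty, PySem.Dict.getD_empty, Bool.false_eq_true, if_false,
        zero_add, List.nil_append, List.length_nil, Nat.cast_zero]
      rw [if_pos (by norm_num : (0:Int) < 1)]
      refine ⟨rfl, rfl, ?_, ?_, ?_, ?_, fun _ => ?_⟩
      · rw [PySem.Dict.keys_insert_of_not_contains _ _ (PySem.Dict.contains_empty x),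
          PySem.Dict.keys_empty]
        rfl
      · rw [PySem.Dict.keys_insert_of_not_contains _ _ (PySem.Dict.contains_empty x),
          PySem.Dict.keys_insert_of_not_contains _ _ (PySem.Dict.contains_empty x)]
      · exact PySem.Dict.nodup_keys_insert _ _ _ (by simp [PySem.Dict.keys_empty])
      · intro k
        by_cases hkx : k = x
        · subst hkx; rw [hget_self]; simp
        · rw [hget_ne _ _ _ hkx, PySem.Dict.getD_empty]
          have hxk : ¬ x = k := fun h => hkx h.symm
          simp [hxk]
      · refine ⟨le_refl 1, ?_, ?_, ⟨x, ?_, ?_, ?_⟩, ?_⟩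
        · intro k hk
          rcases (PySem.Dict.mem_keys_insert _ _ _ _).mp hk with rfl | hk'
          · rw [hget_self]
          · rw [PySem.Dict.keys_empty] at hk'; cases hk'
        · intro k hk
          rcases (PySem.Dict.mem_keys_insert _ _ _ _).mp hk with rfl | hk'
          · exact ⟨0, 0, by simp, by simp, le_refl 0, by simp⟩
          · rw [PySem.Dict.keys_empty] at hk'; cases hk'
        · exact (PySem.Dict.mem_keys_insert _ _ _ _).mpr (Or.inl rfl)
        · rw [hget_self]
        · simp
        · intro k hk _
          rcases (PySem.Dict.mem_keys_insert _ _ _ _).mp hk with rfl | hk'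
          · simp
          · rw [PySem.Dict.keys_empty] at hk'; cases hk'
    · set aO := List.foldl pvStepA (PySem.Dict.empty, PySem.Dict.empty, PySem.Dict.empty)
        (PySem.List.enumerate p 0) with haO
      set bO := List.foldl pvStepB (PySem.Dict.empty, PySem.Dict.empty, 0, 0)
        (PySem.List.enumerate p 0) with hbO
      simp only [pvStepA, pvStepB]
      rw [hbC, hbL]
      have hcx : aO.2.2.getD x 0 = (p.count x : Int) := hcnt x
      rw [hcx]
      obtain ⟨hdeg1, hub, hbounds, ⟨k0, hk0, hck0, hansk0⟩, hmin⟩ := hrest hp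
      have hnd' := PySem.Dict.nodup_keys_insert aO.2.2 x ((p.count x : Int) + 1) hnd
      have hcnt' : ∀ k, (aO.2.2.insert x ((p.count x : Int) + 1)).getD k 0
          = (((p ++ [x]).count k : Nat) : Int) := by
        intro k
        by_cases hkx : k = x
        · subst hkx; rw [hget_self]; simp [List.count_append]
        · rw [hget_ne _ _ _ hkx, hcnt k]
          congr 1
          have hxk : ¬ x = k := fun h => hkx h.symm
          simp [List.count_append, hxk]
      by_cases hmem : x ∈ p
      · -- x already occurred in p
        have hxkC : x ∈ aO.2.2.keys := by
          rw [hkeys]; exact (PySem.Set.mem_ofList p x).mpr hmem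
        have hcontL : aO.1.contains x = true := by
          rw [PySem.Dict.contains_iff_mem_keys, hLk]; exact hxkC
        have hcontC : aO.2.2.contains x = true := by
          rw [PySem.Dict.contains_iff_mem_keys]; exact hxkC
        rw [if_pos hcontL]
        obtain ⟨jL, jR, hjL, hjR, hjle, hjlt⟩ := hbounds x hxkC
        have hcub : (p.count x : Int) ≤ bO.2.2.1 := by rw [← hcx]; exact hub x hxkC
        have hkeys3 : (aO.2.2.insert x ((p.count x : Int) + 1)).keys
            = PySem.Set.ofList (p ++ [x]) := by
          rw [PySem.Dict.keys_insert_of_contains _ _ hcontC, hkeys, hof]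
          simp [PySem.Set.add, (PySem.Set.mem_ofList p x).mpr hmem]
        have hkeys4 : aO.1.keys = (aO.2.2.insert x ((p.count x : Int) + 1)).keys := by
          rw [PySem.Dict.keys_insert_of_contains _ _ hcontC, hLk]
        have hbounds' : ∀ k ∈ (aO.2.2.insert x ((p.count x : Int) + 1)).keys,
            ∃ jL' jR' : Nat, aO.1.getD k 0 = (jL' : Int) ∧
              (aO.2.1.insert x (p.length : Int)).getD k 0 = (jR' : Int) ∧
              jL' ≤ jR' ∧ jR' < (p ++ [x]).length := by
          intro k hk
          simp only [List.length_append, List.length_cons, List.length_nil]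
          by_cases hkx : k = x
          · subst hkx
            exact ⟨jL, p.length, hjL, by rw [hget_self], by omega, by omega⟩
          · have hkO : k ∈ aO.2.2.keys :=
              ((PySem.Dict.mem_keys_insert _ _ _ _).mp hk).resolve_left hkx
            obtain ⟨jL', jR', h1, h2, h3, h4⟩ := hbounds k hkO
            exact ⟨jL', jR', h1, by rw [hget_ne _ _ _ hkx]; exact h2, h3, by omega⟩
        refine ⟨by split_ifs <;> rfl, by split_ifs <;> rfl, hkeys3, hkeys4, hnd', hcnt',
          fun _ => ?_⟩
        split_ifs with hlt hc hsp
        · -- degree strictly increases: the new element alone attains it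
          dsimp only
          refine ⟨by omega, ?_, hbounds', ⟨x, ?_, ?_, ?_⟩, ?_⟩
          · intro k hk
            by_cases hkx : k = x
            · subst hkx; rw [hget_self]
            · rw [hget_ne _ _ _ hkx]
              have hkO : k ∈ aO.2.2.keys :=
                ((PySem.Dict.mem_keys_insert _ _ _ _).mp hk).resolve_left hkx
              have := hub k hkO; omega
          · exact (PySem.Dict.mem_keys_insert _ _ _ _).mpr (Or.inl rfl)
          · rw [hget_self]
          · rw [hget_self]
          · intro k hk hck
            by_cases hkx : k = x
            · subst hkx
              rw [hget_self]
            · rw [hget_ne _ _ _ hkx] at hck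
              have hkO : k ∈ aO.2.2.keys :=
                ((PySem.Dict.mem_keys_insert _ _ _ _).mp hk).resolve_left hkx
              have := hub k hkO; exfalso; omega
        · -- tie, and the new span is strictly smaller: it becomes the answer
          dsimp only
          refine ⟨hdeg1, ?_, hbounds',
            ⟨x, (PySem.Dict.mem_keys_insert _ _ _ _).mpr (Or.inl rfl),
              by rw [hget_self]; exact hc, by rw [hget_self]⟩, ?_⟩
          · intro k hk
            by_cases hkx : k = x
            · subst hkx; rw [hget_self]; omega
            · rw [hget_ne _ _ _ hkx]
              have hkO : k ∈ aO.2.2.keys :=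
                ((PySem.Dict.mem_keys_insert _ _ _ _).mp hk).resolve_left hkx
              exact hub k hkO
          · intro k hk hck
            by_cases hkx : k = x
            · subst hkx
              rw [hget_self]
            · rw [hget_ne _ _ _ hkx] at hck
              have hkO : k ∈ aO.2.2.keys :=
                ((PySem.Dict.mem_keys_insert _ _ _ _).mp hk).resolve_left hkx
              have := hmin k hkO hck
              rw [hget_ne _ _ _ hkx]
              omega
        · -- tie, old answer stays minimal
          dsimp only
          have hk0x : k0 ≠ x := by
            intro h; rw [h, hcx] at hck0; omega
          refine ⟨hdeg1, ?_, hbounds',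
            ⟨k0, (PySem.Dict.mem_keys_insert _ _ _ _).mpr (Or.inr hk0),
              by rw [hget_ne _ _ _ hk0x]; exact hck0,
              by rw [hget_ne _ _ _ hk0x]; exact hansk0⟩, ?_⟩
          · intro k hk
            by_cases hkx : k = x
            · subst hkx; rw [hget_self]; omega
            · rw [hget_ne _ _ _ hkx]
              have hkO : k ∈ aO.2.2.keys :=
                ((PySem.Dict.mem_keys_insert _ _ _ _).mp hk).resolve_left hkx
              exact hub k hkO
          · intro k hk hck
            by_cases hkx : k = x
            · subst hkx
              rw [hget_self]
              omega
            · rw [hget_ne _ _ _ hkx] at hck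
              have hkO : k ∈ aO.2.2.keys :=
                ((PySem.Dict.mem_keys_insert _ _ _ _).mp hk).resolve_left hkx
              rw [hget_ne _ _ _ hkx]
              exact hmin k hkO hck
        · -- count stays below the degree: nothing changes
          dsimp only
          have hk0x : k0 ≠ x := by
            intro h; rw [h, hcx] at hck0; omega
          refine ⟨hdeg1, ?_, hbounds',
            ⟨k0, (PySem.Dict.mem_keys_insert _ _ _ _).mpr (Or.inr hk0),
              by rw [hget_ne _ _ _ hk0x]; exact hck0,
              by rw [hget_ne _ _ _ hk0x]; exact hansk0⟩, ?_⟩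
          · intro k hk
            by_cases hkx : k = x
            · subst hkx; rw [hget_self]; omega
            · rw [hget_ne _ _ _ hkx]
              have hkO : k ∈ aO.2.2.keys :=
                ((PySem.Dict.mem_keys_insert _ _ _ _).mp hk).resolve_left hkx
              exact hub k hkO
          · intro k hk hck
            by_cases hkx : k = x
            · subst hkx
              rw [hget_self] at hck
              exact absurd hck hc
            · rw [hget_ne _ _ _ hkx] at hck
              have hkO : k ∈ aO.2.2.keys :=
                ((PySem.Dict.mem_keys_insert _ _ _ _).mp hk).resolve_left hkx
              rw [hget_ne _ _ _ hkx]
              exact hmin k hkO hck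
      · -- x is a fresh element
        have hcount0 : p.count x = 0 := List.count_eq_zero.mpr hmem
        have hxkC : x ∉ aO.2.2.keys := by
          rw [hkeys]; exact fun h => hmem ((PySem.Set.mem_ofList p x).mp h)
        have hcontL : aO.1.contains x = false :=
          Bool.eq_false_iff.mpr (fun h => hxkC (by
            rw [← hLk]; exact (PySem.Dict.contains_iff_mem_keys _ _).mp h))
        have hcontC : aO.2.2.contains x = false :=
          Bool.eq_false_iff.mpr (fun h => hxkC ((PySem.Dict.contains_iff_mem_keys _ _).mp h))
        rw [if_neg (show ¬ (aO.1.contains x = true) by simp [hcontL])]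
        have hnotm : x ∉ PySem.Set.ofList p := fun h => hmem ((PySem.Set.mem_ofList p x).mp h)
        have hkeys3 : (aO.2.2.insert x ((p.count x : Int) + 1)).keys
            = PySem.Set.ofList (p ++ [x]) := by
          rw [PySem.Dict.keys_insert_of_not_contains _ _ hcontC, hkeys, hof]
          simp [PySem.Set.add, hnotm]
        have hkeys4 : (aO.1.insert x (p.length : Int)).keys
            = (aO.2.2.insert x ((p.count x : Int) + 1)).keys := by
          rw [PySem.Dict.keys_insert_of_not_contains _ _ hcontL,
            PySem.Dict.keys_insert_of_not_contains _ _ hcontC, hLk]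
        have hbounds' : ∀ k ∈ (aO.2.2.insert x ((p.count x : Int) + 1)).keys,
            ∃ jL' jR' : Nat, (aO.1.insert x (p.length : Int)).getD k 0 = (jL' : Int) ∧
              (aO.2.1.insert x (p.length : Int)).getD k 0 = (jR' : Int) ∧
              jL' ≤ jR' ∧ jR' < (p ++ [x]).length := by
          intro k hk
          simp only [List.length_append, List.length_cons, List.length_nil]
          by_cases hkx : k = x
          · subst hkx
            exact ⟨p.length, p.length, by rw [hget_self], by rw [hget_self], le_refl _,
              by omega⟩
          · have hkO : k ∈ aO.2.2.keys :=
              ((PySem.Dict.mem_keys_insert _ _ _ _).mp hk).resolve_left hkx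
            obtain ⟨jL', jR', h1, h2, h3, h4⟩ := hbounds k hkO
            exact ⟨jL', jR', by rw [hget_ne _ _ _ hkx]; exact h1,
              by rw [hget_ne _ _ _ hkx]; exact h2, h3, by omega⟩
        refine ⟨by split_ifs <;> rfl, by split_ifs <;> rfl, hkeys3, hkeys4, hnd', hcnt',
          fun _ => ?_⟩
        split_ifs with hlt hc hsp
        · -- impossible: a fresh element cannot beat an attained degree ≥ 1
          exfalso; omega
        · -- fresh element ties the degree (so the degree is 1) with a smaller span
          dsimp only
          have hk0x : k0 ≠ x := fun h => hxkC (h ▸ hk0)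
          refine ⟨hdeg1, ?_, hbounds',
            ⟨x, (PySem.Dict.mem_keys_insert _ _ _ _).mpr (Or.inl rfl),
              by rw [hget_self]; exact hc, by rw [hget_self, hget_self]⟩, ?_⟩
          · intro k hk
            by_cases hkx : k = x
            · subst hkx; rw [hget_self]; omega
            · rw [hget_ne _ _ _ hkx]
              have hkO : k ∈ aO.2.2.keys :=
                ((PySem.Dict.mem_keys_insert _ _ _ _).mp hk).resolve_left hkx
              exact hub k hkO
          · intro k hk hck
            by_cases hkx : k = x
            · subst hkx
              rw [hget_self, hget_self]
            · rw [hget_ne _ _ _ hkx] at hck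
              have hkO : k ∈ aO.2.2.keys :=
                ((PySem.Dict.mem_keys_insert _ _ _ _).mp hk).resolve_left hkx
              have hmk := hmin k hkO hck
              rw [hget_self] at hsp
              rw [hget_self, hget_ne _ _ _ hkx, hget_ne _ _ _ hkx]
              omega
        · -- fresh tie, old answer stays minimal
          dsimp only
          have hk0x : k0 ≠ x := fun h => hxkC (h ▸ hk0)
          refine ⟨hdeg1, ?_, hbounds',
            ⟨k0, (PySem.Dict.mem_keys_insert _ _ _ _).mpr (Or.inr hk0),
              by rw [hget_ne _ _ _ hk0x]; exact hck0,
              by rw [hget_ne _ _ _ hk0x, hget_ne _ _ _ hk0x]; exact hansk0⟩, ?_⟩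
          · intro k hk
            by_cases hkx : k = x
            · subst hkx; rw [hget_self]; omega
            · rw [hget_ne _ _ _ hkx]
              have hkO : k ∈ aO.2.2.keys :=
                ((PySem.Dict.mem_keys_insert _ _ _ _).mp hk).resolve_left hkx
              exact hub k hkO
          · intro k hk hck
            rw [hget_self] at hsp
            by_cases hkx : k = x
            · subst hkx
              rw [hget_self, hget_self]
              omega
            · rw [hget_ne _ _ _ hkx] at hck
              have hkO : k ∈ aO.2.2.keys :=
                ((PySem.Dict.mem_keys_insert _ _ _ _).mp hk).resolve_left hkx
              rw [hget_ne _ _ _ hkx, hget_ne _ _ _ hkx]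
              exact hmin k hkO hck
        · -- fresh element below the degree: nothing changes
          dsimp only
          have hk0x : k0 ≠ x := fun h => hxkC (h ▸ hk0)
          refine ⟨hdeg1, ?_, hbounds',
            ⟨k0, (PySem.Dict.mem_keys_insert _ _ _ _).mpr (Or.inr hk0),
              by rw [hget_ne _ _ _ hk0x]; exact hck0,
              by rw [hget_ne _ _ _ hk0x, hget_ne _ _ _ hk0x]; exact hansk0⟩, ?_⟩
          · intro k hk
            by_cases hkx : k = x
            · subst hkx; rw [hget_self]; omega
            · rw [hget_ne _ _ _ hkx]
              have hkO : k ∈ aO.2.2.keys :=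
                ((PySem.Dict.mem_keys_insert _ _ _ _).mp hk).resolve_left hkx
              exact hub k hkO
          · intro k hk hck
            by_cases hkx : k = x
            · subst hkx
              rw [hget_self] at hck
              exact absurd hck hc
            · rw [hget_ne _ _ _ hkx] at hck
              have hkO : k ∈ aO.2.2.keys :=
                ((PySem.Dict.mem_keys_insert _ _ _ _).mp hk).resolve_left hkx
              rw [hget_ne _ _ _ hkx, hget_ne _ _ _ hkx]
              exact hmin k hkO hck

-- evaluating A's conditional-min fold over the keys once the min is pinned down
lemma pv_foldl_min_if {κ : Type} (cond : κ → Prop) [DecidablePred cond] (val : κ → Int)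
    (ans : Int) (l : List κ) (a : Int)
    (hub : ∀ k ∈ l, cond k → ans ≤ val k) (ha : ans ≤ a)
    (hex : a = ans ∨ ∃ k ∈ l, cond k ∧ val k = ans) :
    l.foldl (fun acc k => if cond k then min acc (val k) else acc) a = ans := by
  induction l generalizing a with
  | nil =>
    rcases hex with h | ⟨k, hk, _⟩
    · simpa using h
    · cases hk
  | cons k t ih =>
    simp only [List.foldl_cons]
    by_cases hc : cond k
    · simp only [if_pos hc]
      refine ih _ (fun k' hk' => hub k' (List.mem_cons_of_mem _ hk'))
        (le_min ha (hub k (List.mem_cons_self) hc)) ?_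
      rcases hex with h | ⟨k', hk', hck', hvk'⟩
      · subst h
        exact Or.inl (min_eq_left (hub k (List.mem_cons_self) hc))
      · rcases List.mem_cons.mp hk' with rfl | hk't
        · exact Or.inl (by rw [hvk']; exact min_eq_right ha)
        · exact Or.inr ⟨k', hk't, hck', hvk'⟩
    · simp only [if_neg hc]
      refine ih _ (fun k' hk' => hub k' (List.mem_cons_of_mem _ hk')) ha ?_
      rcases hex with h | ⟨k', hk', hck', hvk'⟩
      · exact Or.inl h
      · rcases List.mem_cons.mp hk' with rfl | hk't
        · exact absurd hck' hc
        · exact Or.inr ⟨k', hk't, hck', hvk'⟩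

-- ===== VERDICT (by name: the statement is the Claim_ definition above) =====
lemma pv_getD_eq_get? (d : PySem.Dict Int Int) (k : Int) : d.getD k 0 = (d.get? k).getD 0 := by
  simp only [PySem.Dict.getD, PySem.Dict.get?]

theorem subarray_degree_spec : Claim_equal_subarray_degree := by
  intro nums _ hpre
  unfold Spec_subarray_degree subarray_degree subarray_degree_alt
  have hinv := pvInv_all nums
  unfold pvInv at hinv
  obtain ⟨hbC, hbL, hkeys, hLk, hnd, hcnt, hrest⟩ := hinv
  obtain ⟨hdeg1, hub, hbounds, ⟨k0, hk0, hck0, hans⟩, hmin⟩ := hrest hpre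
  set a := (PySem.List.enumerate nums).foldl pvStepA
    (PySem.Dict.empty, PySem.Dict.empty, PySem.Dict.empty) with ha
  set b := (PySem.List.enumerate nums).foldl pvStepB
    (PySem.Dict.empty, PySem.Dict.empty, 0, 0) with hb
  change (match PySem.List.max? a.2.2.values (fun v => v) with
    | none => ((nums.length : Int))
    | some degree => List.foldl (fun answer num =>
        if a.2.2.getD num 0 = degree then
          min answer (a.2.1.getD num 0 - a.1.getD num 0 + 1)
        else answer) ((nums.length : Int)) a.2.2.keys) = b.2.2.2
  -- the keys (hence values) list is nonempty
  have hvne : a.2.2.values ≠ [] := by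
    have : a.2.2.keys ≠ [] := List.ne_nil_of_mem hk0
    intro h
    exact this (by
      have : a.2.2.items = [] := by
        have hv : a.2.2.items.map (·.2) = [] := h
        exact List.map_eq_nil_iff.mp hv
      show a.2.2.items.map (·.1) = []
      rw [this]; rfl)
  -- A's degree is B's running degree
  cases hmax : PySem.List.max? a.2.2.values (fun v => v) with
  | none => exact absurd ((PySem.List.max?_eq_none_iff _ _).mp hmax) hvne
  | some m =>
    have hdegval : a.2.2.getD k0 0 = b.2.2.1 := hck0
    have hdeg_mem : b.2.2.1 ∈ a.2.2.values := by
      have hget : a.2.2.get? k0 ≠ none := fun h =>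
        (PySem.Dict.get?_eq_none_iff_not_mem_keys _ _).mp h hk0
      cases hg : a.2.2.get? k0 with
      | none => exact absurd hg hget
      | some w =>
        have hw : w = b.2.2.1 := by
          have h2 := pv_getD_eq_get? a.2.2 k0
          rw [hg] at h2
          simp only [Option.getD_some] at h2
          rw [← h2]; exact hdegval
        have : (k0, b.2.2.1) ∈ a.2.2.items :=
          PySem.Dict.mem_items_of_get?_eq_some _ (hw ▸ hg)
        exact List.mem_map.mpr ⟨(k0, b.2.2.1), this, rfl⟩
    have hm_le : m ≤ b.2.2.1 := by
      have hmem := PySem.List.max?_mem hmax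
      obtain ⟨pr, hpr, hpr2⟩ := List.mem_map.mp hmem
      have hk : pr.1 ∈ a.2.2.keys := PySem.Dict.mem_keys_of_mem_items _ hpr
      have : a.2.2.getD pr.1 0 = m := by
        have : a.2.2.getD pr.1 0 = pr.2 := by
          have := PySem.Dict.getD_of_mem_items a.2.2 (k := pr.1) (v := pr.2) (by simpa using hpr) hnd 0
          exact this
        rw [this, hpr2]
      exact this ▸ hub pr.1 hk
    have hle_m : b.2.2.1 ≤ m := PySem.List.max?_isMax hmax _ hdeg_mem
    have hmdeg : m = b.2.2.1 := le_antisymm hm_le hle_m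
    rw [hmdeg]
    -- A's final fold over the keys computes B's answer
    have hansle : b.2.2.2 ≤ (nums.length : Int) := by
      obtain ⟨jL, jR, hL, hR, hle, hlt⟩ := hbounds k0 hk0
      rw [hans, hL, hR]; omega
    show List.foldl (fun answer num =>
        if a.2.2.getD num 0 = b.2.2.1 then
          min answer (a.2.1.getD num 0 - a.1.getD num 0 + 1)
        else answer) ((nums.length : Int)) a.2.2.keys = b.2.2.2
    have hfold := pv_foldl_min_if (fun k => a.2.2.getD k 0 = b.2.2.1)
      (fun k => a.2.1.getD k 0 - a.1.getD k 0 + 1) b.2.2.2 a.2.2.keys ((nums.length : Int))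
      (fun k hk hc => hmin k hk hc) hansle (Or.inr ⟨k0, hk0, hck0, hans.symm⟩)
    exact hfold
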